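-- pv_equiv track=rewrite | github.com/Gururazer/Daily_dsa | DAY-7/3027. Find the Number of Ways to Place People II.py | numberOfPairs
-- ===== SOURCE A (Python) =====
-- from typing import List
--
-- def numberOfPairs(points: List[List[int]]) -> int:
--     n = len(points)
--
--
--     xs = sorted(set(x for x, y in points))
--     ys = sorted(set(y for x, y in points))
--     x_map = {x:i+1 for i, x in enumerate(xs)}
--     y_map = {y:i+1 for i, y in enumerate(ys)}
--
--
--     m = len(xs)
--     k = len(ys)
--     grid = [[0]*(k+2) for _ in range(m+2)]
--     for x, y in points:
--         grid[x_map[x]][y_map[y]] = 1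
--
--
--     ps = [[0]*(k+2) for _ in range(m+2)]
--     for i in range(1, m+1):
--         for j in range(1, k+1):
--             ps[i][j] = (grid[i][j]
--                         + ps[i-1][j]
--                         + ps[i][j-1]
--                         - ps[i-1][j-1])
--
--     def rect_count(x1, y1, x2, y2):
--         return (ps[x2][y2] - ps[x1-1][y2] - ps[x2][y1-1] + ps[x1-1][y1-1])
--
--
--     ans = 0
--     for i in range(n):
--         xa, ya = points[i]
--         for j in range(n):
--             if i == j: continue
--             xb, yb = points[j]
--
--
--             if xa <= xb and ya >= yb:
--                 x1, x2 = x_map[xa], x_map[xb]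
--                 y1, y2 = y_map[yb], y_map[ya]
--                 if rect_count(x1, y1, x2, y2) == 2:
--                     ans += 1
--     return ans
-- ===== SOURCE B (Python) =====
-- from typing import List
--
-- def numberOfPairs(points: List[List[int]]) -> int:
--     # Direct check: for each dominating pair with distinct positions, count it
--     # when no point at a third position lies in their bounding rectangle.
--     ans = 0
--     for i, (xa, ya) in enumerate(points):
--         for j, (xb, yb) in enumerate(points):
--             if i == j or (xa, ya) == (xb, yb):
--                 continue
--             if xa <= xb and ya >= yb:
--                 if all((x, y) == (xa, ya) or (x, y) == (xb, yb)
--                        or not (xa <= x <= xb and yb <= y <= ya)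
--                        for x, y in points):
--                     ans += 1
--     return ans
-- ===== Notes on version B (the rewrite author's own statement) =====
-- stated objective: simpler
-- what changed: B drops A's coordinate compression, occupancy grid and 2D prefix-sum table entirely and instead, for each dominating pair of distinct positions, directly scans the point list once to check that no point at a third position lies in the bounding rectangle.
import Mathlib
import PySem

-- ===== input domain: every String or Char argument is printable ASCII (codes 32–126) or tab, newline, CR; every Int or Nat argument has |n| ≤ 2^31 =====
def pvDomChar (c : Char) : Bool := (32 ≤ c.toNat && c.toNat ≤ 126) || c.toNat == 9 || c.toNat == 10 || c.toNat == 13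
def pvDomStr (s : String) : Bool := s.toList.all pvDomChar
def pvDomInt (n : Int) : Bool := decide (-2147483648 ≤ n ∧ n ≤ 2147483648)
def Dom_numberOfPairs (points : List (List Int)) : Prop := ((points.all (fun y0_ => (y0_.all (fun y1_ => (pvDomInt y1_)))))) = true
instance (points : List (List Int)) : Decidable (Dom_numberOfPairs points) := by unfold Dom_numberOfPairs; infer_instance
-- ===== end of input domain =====

-- B re-implements A's rectangle count without the compressed grid / 2D prefix sums: a direct
-- scan of the point list for each dominating pair; return values agree (proved below).

-- ===== PORT A =====
-- A-side helpers: each Python assignment of A becomes one definition; `pvARead ps i j` is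
-- Python's `ps[i][j]` (pyGetD is exact for the in-range indices A uses) and pvARectCount is
-- A's nested helper `rect_count`.
def pvARead (g : List (List Int)) (i j : Int) : Int :=
  PySem.List.pyGetD (PySem.List.pyGetD g i []) j 0

def pvARectCount (ps : List (List Int)) (x1 y1 x2 y2 : Int) : Int :=
  pvARead ps x2 y2 - pvARead ps (x1 - 1) y2 - pvARead ps x2 (y1 - 1) + pvARead ps (x1 - 1) (y1 - 1)

-- xs = sorted(set(x for x, y in points)); ys likewise (sorted normalises the set's order)
def pvAXs (points : List (List Int)) : List Int :=
  PySem.List.sorted (PySem.Set.ofList (points.map (fun p => PySem.List.pyGetD p 0 0))) (fun v => v)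
def pvAYs (points : List (List Int)) : List Int :=
  PySem.List.sorted (PySem.Set.ofList (points.map (fun p => PySem.List.pyGetD p 1 0))) (fun v => v)

-- x_map = {x: i+1 for i, x in enumerate(xs)}; y_map likewise
def pvAXmap (points : List (List Int)) : PySem.Dict Int Int :=
  (PySem.List.enumerate (pvAXs points)).foldl (fun d q => d.insert q.2 (q.1 + 1)) PySem.Dict.empty
def pvAYmap (points : List (List Int)) : PySem.Dict Int Int :=
  (PySem.List.enumerate (pvAYs points)).foldl (fun d q => d.insert q.2 (q.1 + 1)) PySem.Dict.empty

-- grid = [[0]*(k+2) for _ in range(m+2)]; for x, y in points: grid[x_map[x]][y_map[y]] = 1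
-- (the dict lookups are exact on Pre_: every coordinate is a key; writes are in range)
def pvAGrid (points : List (List Int)) : List (List Int) :=
  points.foldl (fun g p =>
      let xi := (pvAXmap points).getD (PySem.List.pyGetD p 0 0) 0
      let yi := (pvAYmap points).getD (PySem.List.pyGetD p 1 0) 0
      PySem.List.pySetD g xi (PySem.List.pySetD (PySem.List.pyGetD g xi []) yi 1))
    (List.replicate ((pvAXs points).length + 2) (List.replicate ((pvAYs points).length + 2) (0 : Int)))

-- ps = [[0]*(k+2) for _ in range(m+2)]; the double loop of prefix sums
def pvAPS (points : List (List Int)) : List (List Int) :=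
  (PySem.List.pyRange 1 (PySem.List.len (pvAXs points) + 1) 1).foldl (fun ps i =>
      (PySem.List.pyRange 1 (PySem.List.len (pvAYs points) + 1) 1).foldl (fun ps j =>
          PySem.List.pySetD ps i (PySem.List.pySetD (PySem.List.pyGetD ps i []) j
            (pvARead (pvAGrid points) i j + pvARead ps (i - 1) j
              + pvARead ps i (j - 1) - pvARead ps (i - 1) (j - 1)))) ps)
    (List.replicate ((pvAXs points).length + 2) (List.replicate ((pvAYs points).length + 2) (0 : Int)))

def numberOfPairs (points : List (List Int)) : Int :=
  let n : Int := PySem.List.len points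
  (PySem.List.pyRange 0 n 1).foldl (fun ans i =>
      let pa := PySem.List.pyGetD points i []
      let xa := PySem.List.pyGetD pa 0 0
      let ya := PySem.List.pyGetD pa 1 0
      (PySem.List.pyRange 0 n 1).foldl (fun ans j =>
          if i = j then ans
          else
            let pb := PySem.List.pyGetD points j []
            let xb := PySem.List.pyGetD pb 0 0
            let yb := PySem.List.pyGetD pb 1 0
            if xa ≤ xb ∧ ya ≥ yb then
              if pvARectCount (pvAPS points) ((pvAXmap points).getD xa 0)
                  ((pvAYmap points).getD yb 0) ((pvAXmap points).getD xb 0)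
                  ((pvAYmap points).getD ya 0) = 2 then ans + 1
              else ans
            else ans) ans) 0

-- ===== PORT B =====
def numberOfPairs_alt (points : List (List Int)) : Int :=
  (PySem.List.enumerate points).foldl (fun ans q =>
      let xa := PySem.List.pyGetD q.2 0 0
      let ya := PySem.List.pyGetD q.2 1 0
      (PySem.List.enumerate points).foldl (fun ans r =>
          let xb := PySem.List.pyGetD r.2 0 0
          let yb := PySem.List.pyGetD r.2 1 0
          if q.1 = r.1 ∨ (xa = xb ∧ ya = yb) then ans
          else if xa ≤ xb ∧ ya ≥ yb then
            if points.all (fun p =>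
                let x := PySem.List.pyGetD p 0 0
                let y := PySem.List.pyGetD p 1 0
                decide ((x = xa ∧ y = ya) ∨ (x = xb ∧ y = yb) ∨
                  ¬(xa ≤ x ∧ x ≤ xb ∧ yb ≤ y ∧ y ≤ ya))) then ans + 1
            else ans
          else ans) ans) 0

-- ===== PRECONDITION & SPEC =====
-- Pre_ excludes exactly the inputs on which Python A raises: a sublist whose length is not 2
-- makes A's `for x, y in points` unpacking raise ValueError (B raises there too).
def Pre_numberOfPairs (points : List (List Int)) : Prop := ∀ p ∈ points, p.length = 2
instance (points : List (List Int)) : Decidable (Pre_numberOfPairs points) := by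
  unfold Pre_numberOfPairs; infer_instance

def pvWitness_numberOfPairs : List (List Int) := [[1, 1], [3, 3], [2, 0]]

def Spec_numberOfPairs (points : List (List Int)) (out : Int) : Prop := out = numberOfPairs_alt points
instance (points : List (List Int)) (out : Int) : Decidable (Spec_numberOfPairs points out) := by
  unfold Spec_numberOfPairs; infer_instance

-- ===== CLAIM (what is proved, stated in full; the proofs are below) =====
def Claim_equal_numberOfPairs : Prop := ∀ (points : List (List Int)), Dom_numberOfPairs points → Pre_numberOfPairs points → Spec_numberOfPairs points (numberOfPairs points)

-- ===== LEMMAS AND PROOFS =====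

-- Abbreviations for the proof: coordinates, compressed cell indices, the cell set and the
-- rectangle-counting function pvNN (number of occupied cells in the lower-left rectangle).
def pvX (p : List Int) : Int := PySem.List.pyGetD p 0 0
def pvY (p : List Int) : Int := PySem.List.pyGetD p 1 0
def pvCX (points : List (List Int)) (x : Int) : Nat := (pvAXs points).idxOf x + 1
def pvCY (points : List (List Int)) (y : Int) : Nat := (pvAYs points).idxOf y + 1
def pvCell (points : List (List Int)) (p : List Int) : Nat × Nat :=
  (pvCX points (pvX p), pvCY points (pvY p))
def pvCells (points : List (List Int)) : Finset (Nat × Nat) :=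
  (points.map (pvCell points)).toFinset
def pvNN (points : List (List Int)) (i j : Nat) : Int :=
  (((pvCells points).filter (fun c => c.1 ≤ i ∧ c.2 ≤ j)).card : Int)
def pvReadN (g : List (List Int)) (a b : Nat) : Int := (g.getD a []).getD b 0

@[simp] lemma pvARead_natCast (g : List (List Int)) (a b : Nat) :
    pvARead g (a : Int) (b : Int) = pvReadN g a b := by
  simp [pvARead, pvReadN]

-- strictly sorted lists and idxOf
lemma pv_pairwise_lt (l : List Int) (hnd : l.Nodup) (hle : l.Pairwise (· ≤ ·)) :
    l.Pairwise (· < ·) := by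
  rw [List.pairwise_iff_getElem] at hle ⊢
  intro i j hi hj hij
  rcases lt_or_eq_of_le (hle i j hi hj hij) with h | h
  · exact h
  · exact absurd ((List.Nodup.getElem_inj_iff hnd).mp h) (by omega)

lemma pv_xs_nodup (points : List (List Int)) : (pvAXs points).Nodup := by
  unfold pvAXs
  exact ((PySem.List.sorted_perm _ _ _).nodup_iff).mpr (PySem.Set.nodup_ofList _)

lemma pv_ys_nodup (points : List (List Int)) : (pvAYs points).Nodup := by
  unfold pvAYs
  exact ((PySem.List.sorted_perm _ _ _).nodup_iff).mpr (PySem.Set.nodup_ofList _)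

lemma pv_xs_lt (points : List (List Int)) : (pvAXs points).Pairwise (· < ·) := by
  apply pv_pairwise_lt
  · exact ((PySem.List.sorted_perm _ _ _).nodup_iff).mpr (PySem.Set.nodup_ofList _)
  · simpa using PySem.List.sorted_pairwise (PySem.Set.ofList (points.map (fun p => PySem.List.pyGetD p 0 0))) (fun v => v)

lemma pv_ys_lt (points : List (List Int)) : (pvAYs points).Pairwise (· < ·) := by
  apply pv_pairwise_lt
  · exact ((PySem.List.sorted_perm _ _ _).nodup_iff).mpr (PySem.Set.nodup_ofList _)
  · simpa using PySem.List.sorted_pairwise (PySem.Set.ofList (points.map (fun p => PySem.List.pyGetD p 1 0))) (fun v => v)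

lemma pv_mem_xs (points : List (List Int)) (p : List Int) (hp : p ∈ points) :
    pvX p ∈ pvAXs points := by
  unfold pvAXs pvX
  rw [(PySem.List.sorted_perm _ _ _).mem_iff, PySem.Set.mem_ofList]
  exact List.mem_map_of_mem hp

lemma pv_mem_ys (points : List (List Int)) (p : List Int) (hp : p ∈ points) :
    pvY p ∈ pvAYs points := by
  unfold pvAYs pvY
  rw [(PySem.List.sorted_perm _ _ _).mem_iff, PySem.Set.mem_ofList]
  exact List.mem_map_of_mem hp

lemma pv_idxOf_le_iff (l : List Int) (hlt : l.Pairwise (· < ·)) (a b : Int)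
    (ha : a ∈ l) (hb : b ∈ l) : l.idxOf a ≤ l.idxOf b ↔ a ≤ b := by
  have hia : l.idxOf a < l.length := List.idxOf_lt_length_of_mem ha
  have hib : l.idxOf b < l.length := List.idxOf_lt_length_of_mem hb
  have ga : l[l.idxOf a] = a := List.getElem_idxOf hia
  have gb : l[l.idxOf b] = b := List.getElem_idxOf hib
  rw [List.pairwise_iff_getElem] at hlt
  constructor
  · intro h
    rcases lt_or_eq_of_le h with h' | h'
    · exact le_of_lt (ga ▸ gb ▸ hlt _ _ hia hib h')
    · have he : l[l.idxOf a]? = l[l.idxOf b]? := by rw [h']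
      rw [List.getElem?_eq_getElem hia, List.getElem?_eq_getElem hib, ga, gb] at he
      exact le_of_eq (Option.some.inj he)
  · intro h
    by_contra h2
    have h2' : l.idxOf b < l.idxOf a := by omega
    have : b < a := gb ▸ ga ▸ hlt _ _ hib hia h2'
    omega

lemma pv_idxOf_inj (l : List Int) (_hlt : l.Pairwise (· < ·)) (a b : Int)
    (ha : a ∈ l) (hb : b ∈ l) (h : l.idxOf a = l.idxOf b) : a = b := by
  have hia : l.idxOf a < l.length := List.idxOf_lt_length_of_mem ha
  have ga : l[l.idxOf a] = a := List.getElem_idxOf hia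
  have gb : l[l.idxOf b] = b := List.getElem_idxOf (List.idxOf_lt_length_of_mem hb)
  rw [← ga, ← gb]
  congr 1

-- the enumerate/insert dict of A: lookup of a member is its index + 1
lemma pv_dict_getD (l : List Int) (hnd : l.Nodup) : ∀ (s : Int) (d : PySem.Dict Int Int) (x : Int),
    ((PySem.List.enumerate l s).foldl (fun d q => d.insert q.2 (q.1 + 1)) d).getD x 0 =
      if x ∈ l then s + (l.idxOf x : Int) + 1 else d.getD x 0 := by
  induction l with
  | nil =>
    intro s d x
    simp [PySem.List.enumerate_nil]
  | cons a l ih =>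
    intro s d x
    have hna : a ∉ l := (List.nodup_cons.mp hnd).1
    have hnd' : l.Nodup := (List.nodup_cons.mp hnd).2
    rw [PySem.List.enumerate_cons]
    simp only [List.foldl_cons]
    rw [ih hnd' (s + 1) (d.insert a (s + 1)) x]
    by_cases hxl : x ∈ l
    · have hxa : a ≠ x := fun h => hna (h ▸ hxl)
      rw [if_pos hxl, if_pos (List.mem_cons_of_mem a hxl), List.idxOf_cons_ne l hxa]
      push_cast
      ring
    · rw [if_neg hxl, PySem.Dict.getD_insert]
      by_cases hxa : x = a
      · subst hxa
        rw [if_pos rfl, if_pos (List.mem_cons_self), List.idxOf_cons_self]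
        push_cast
        ring
      · rw [if_neg hxa, if_neg (by simp [List.mem_cons, hxa, hxl])]

lemma pv_xmap_getD (points : List (List Int)) (x : Int) (hx : x ∈ pvAXs points) :
    (pvAXmap points).getD x 0 = (pvCX points x : Int) := by
  unfold pvAXmap pvCX
  rw [pv_dict_getD (pvAXs points) (pv_xs_nodup points) 0 PySem.Dict.empty x]
  rw [if_pos hx]
  push_cast
  ring

lemma pv_ymap_getD (points : List (List Int)) (y : Int) (hy : y ∈ pvAYs points) :
    (pvAYmap points).getD y 0 = (pvCY points y : Int) := by
  unfold pvAYmap pvCY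
  rw [pv_dict_getD (pvAYs points) (pv_ys_nodup points) 0 PySem.Dict.empty y]
  rw [if_pos hy]
  push_cast
  ring

-- reading after a 2D write
lemma pv_readN_set (g : List (List Int)) (x y : Nat) (v : Int) (a b : Nat)
    (hx : x < g.length) (hy : y < (g.getD x []).length) :
    pvReadN (g.set x ((g.getD x []).set y v)) a b =
      if a = x ∧ b = y then v else pvReadN g a b := by
  unfold pvReadN
  have h1 : (g.set x ((g.getD x []).set y v)).getD a [] =
      if a = x then (g.getD x []).set y v else g.getD a [] := by
    simp only [List.getD_eq_getElem?_getD, List.getElem?_set]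
    by_cases hax : a = x
    · subst hax
      simp [hx]
    · simp [hax, Ne.symm hax]
  rw [h1]
  by_cases hax : a = x
  · subst hax
    rw [if_pos rfl]
    simp only [List.getD_eq_getElem?_getD, List.getElem?_set]
    by_cases hby : b = y
    · subst hby
      rw [List.getD_eq_getElem?_getD] at hy
      simp [hy]
    · simp [hby, Ne.symm hby]
  · rw [if_neg hax, if_neg (by tauto)]

lemma pv_readN_replicate (M K : Nat) (a b : Nat) :
    pvReadN (List.replicate M (List.replicate K (0 : Int))) a b = 0 := by
  unfold pvReadN
  rcases lt_or_ge a M with h | h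
  · rw [List.getD_replicate _ h]
    rcases lt_or_ge b K with h2 | h2
    · rw [List.getD_replicate _ h2]
    · have hb : (List.replicate K (0 : Int)).getD b 0 = 0 := by
        rw [List.getD_eq_getElem?_getD, List.getElem?_eq_none (by simpa using h2)]
        rfl
      exact hb
  · have ha : (List.replicate M (List.replicate K (0 : Int))).getD a [] = [] := by
      rw [List.getD_eq_getElem?_getD, List.getElem?_eq_none (by simpa using h)]
      rfl
    rw [ha]
    rfl

-- the grid-building loop, abstractly
lemma pv_grid_fold {α : Type} (cx cy : α → Nat) (K : Nat) : ∀ (l : List α) (g : List (List Int)),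
    (∀ p ∈ l, cx p < g.length) → (∀ x, x < g.length → (g.getD x []).length = K) →
    (∀ p ∈ l, cy p < K) → ∀ a b : Nat,
    pvReadN (l.foldl (fun g p => g.set (cx p) ((g.getD (cx p) []).set (cy p) 1)) g) a b =
      if ∃ p ∈ l, cx p = a ∧ cy p = b then (1 : Int) else pvReadN g a b := by
  intro l
  induction l with
  | nil =>
    intro g h1 h2 h3 a b
    simp
  | cons p l ih =>
    intro g h1 h2 h3 a b
    simp only [List.foldl_cons]
    have hpg : cx p < g.length := h1 p (List.mem_cons_self)
    have hpK : cy p < K := h3 p (List.mem_cons_self)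
    have hrowp : (g.getD (cx p) []).length = K := h2 _ hpg
    have hlen : (g.set (cx p) ((g.getD (cx p) []).set (cy p) 1)).length = g.length :=
      List.length_set
    have hrow : ∀ x, x < (g.set (cx p) ((g.getD (cx p) []).set (cy p) 1)).length →
        ((g.set (cx p) ((g.getD (cx p) []).set (cy p) 1)).getD x []).length = K := by
      intro x hxlt
      rw [hlen] at hxlt
      by_cases hxe : x = cx p
      · have : (g.set (cx p) ((g.getD (cx p) []).set (cy p) 1)).getD x [] =
            (g.getD (cx p) []).set (cy p) 1 := by
          rw [hxe]
          simp only [List.getD_eq_getElem?_getD, List.getElem?_set]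
          simp [hpg]
        rw [this, List.length_set]
        exact h2 _ hpg
      · have : (g.set (cx p) ((g.getD (cx p) []).set (cy p) 1)).getD x [] = g.getD x [] := by
          simp only [List.getD_eq_getElem?_getD, List.getElem?_set]
          simp [Ne.symm hxe]
        rw [this]
        exact h2 x hxlt
    rw [ih _ (fun q hq => hlen ▸ h1 q (List.mem_cons_of_mem p hq)) hrow
      (fun q hq => h3 q (List.mem_cons_of_mem p hq)) a b]
    rw [pv_readN_set g (cx p) (cy p) 1 a b hpg (hrowp ▸ hpK)]
    have hiff : (∃ q ∈ p :: l, cx q = a ∧ cy q = b) ↔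
        ((cx p = a ∧ cy p = b) ∨ ∃ q ∈ l, cx q = a ∧ cy q = b) :=
      List.exists_mem_cons_iff _ p l
    by_cases hex : ∃ q ∈ l, cx q = a ∧ cy q = b
    · rw [if_pos hex, if_pos (hiff.mpr (Or.inr hex))]
    · by_cases hpc : cx p = a ∧ cy p = b
      · rw [if_neg hex, if_pos ⟨hpc.1.symm, hpc.2.symm⟩, if_pos (hiff.mpr (Or.inl hpc))]
      · rw [if_neg hex, if_neg (fun h => hpc ⟨h.1.symm, h.2.symm⟩),
          if_neg (fun h => (hiff.mp h).elim hpc hex)]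

lemma pv_cx_lt (points : List (List Int)) (x : Int) (hx : x ∈ pvAXs points) :
    pvCX points x ≤ (pvAXs points).length := by
  unfold pvCX
  have := List.idxOf_lt_length_of_mem hx
  omega

lemma pv_cy_lt (points : List (List Int)) (y : Int) (hy : y ∈ pvAYs points) :
    pvCY points y ≤ (pvAYs points).length := by
  unfold pvCY
  have := List.idxOf_lt_length_of_mem hy
  omega

-- the grid of A holds exactly the occupied cells
lemma pv_grid_eq (points : List (List Int)) (a b : Nat) :
    pvReadN (pvAGrid points) a b = if (a, b) ∈ pvCells points then (1 : Int) else 0 := by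
  unfold pvAGrid
  rw [PySem.List.foldl_congr_mem _ _
    (fun g p => g.set (pvCX points (pvX p)) ((g.getD (pvCX points (pvX p)) []).set (pvCY points (pvY p)) 1)) _
    (by
      intro g p hp
      have hx := pv_mem_xs points p hp
      have hy := pv_mem_ys points p hp
      show PySem.List.pySetD g ((pvAXmap points).getD (pvX p) 0)
          (PySem.List.pySetD (PySem.List.pyGetD g ((pvAXmap points).getD (pvX p) 0) [])
            ((pvAYmap points).getD (pvY p) 0) 1) = _
      rw [pv_xmap_getD points _ hx, pv_ymap_getD points _ hy]
      rw [PySem.List.pySetD_natCast, PySem.List.pyGetD_natCast, PySem.List.pySetD_natCast])]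
  rw [pv_grid_fold (fun p => pvCX points (pvX p)) (fun p => pvCY points (pvY p))
      ((pvAYs points).length + 2) points _
      (by
        intro p hp
        dsimp only
        rw [List.length_replicate]
        have := pv_cx_lt points _ (pv_mem_xs points p hp)
        omega)
      (by
        intro x hxlt
        rw [List.length_replicate] at hxlt
        rw [List.getD_replicate _ hxlt, List.length_replicate])
      (by
        intro p hp
        dsimp only
        have := pv_cy_lt points _ (pv_mem_ys points p hp)
        omega) a b]
  rw [pv_readN_replicate]
  have hmem : (a, b) ∈ pvCells points ↔ ∃ p ∈ points, pvCX points (pvX p) = a ∧ pvCY points (pvY p) = b := by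
    unfold pvCells pvCell
    rw [List.mem_toFinset, List.mem_map]
    constructor
    · rintro ⟨p, hp, hpe⟩
      exact ⟨p, hp, (Prod.mk.injEq _ _ _ _).mp hpe⟩
    · rintro ⟨p, hp, h1, h2⟩
      exact ⟨p, hp, by rw [h1, h2]⟩
  by_cases hex : ∃ p ∈ points, pvCX points (pvX p) = a ∧ pvCY points (pvY p) = b
  · rw [if_pos hex, if_pos (hmem.mpr hex)]
  · rw [if_neg hex, if_neg (fun h => hex (hmem.mp h))]

-- pvNN facts
lemma pv_cells_pos (points : List (List Int)) :
    ∀ c ∈ pvCells points, 1 ≤ c.1 ∧ 1 ≤ c.2 := by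
  intro c hc
  unfold pvCells at hc
  rw [List.mem_toFinset, List.mem_map] at hc
  obtain ⟨p, _, hpe⟩ := hc
  rw [← hpe]
  unfold pvCell pvCX pvCY
  constructor <;> simp

lemma pvNN_zero_left (points : List (List Int)) (j : Nat) : pvNN points 0 j = 0 := by
  unfold pvNN
  rw [Finset.filter_false_of_mem (fun c hc => by
    have := pv_cells_pos points c hc
    omega)]
  simp

lemma pvNN_zero_right (points : List (List Int)) (i : Nat) : pvNN points i 0 = 0 := by
  unfold pvNN
  rw [Finset.filter_false_of_mem (fun c hc => by
    have := pv_cells_pos points c hc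
    omega)]
  simp

lemma pvNN_rec (points : List (List Int)) (i j : Nat) (hi : 1 ≤ i) (hj : 1 ≤ j) :
    pvNN points i j = (if (i, j) ∈ pvCells points then (1 : Int) else 0)
      + pvNN points (i - 1) j + pvNN points i (j - 1) - pvNN points (i - 1) (j - 1) := by
  unfold pvNN
  rw [show (if (i, j) ∈ pvCells points then (1 : Int) else 0)
      = ∑ c ∈ pvCells points, if c = (i, j) then (1 : Int) else 0 from
    (Finset.sum_ite_eq' (pvCells points) (i, j) (fun _ => (1 : Int))).symm]
  simp only [Finset.card_filter]
  push_cast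
  rw [← Finset.sum_add_distrib, ← Finset.sum_add_distrib, ← Finset.sum_sub_distrib]
  refine Finset.sum_congr rfl ?_
  rintro ⟨c1, c2⟩ hc
  have hpos := pv_cells_pos points _ hc
  simp only [Prod.mk.injEq] at *
  split_ifs <;> omega

lemma pvNN_rect (points : List (List Int)) (x1 y1 x2 y2 : Nat) (h1 : 1 ≤ x1) (h2 : x1 ≤ x2)
    (h3 : 1 ≤ y1) (h4 : y1 ≤ y2) :
    pvNN points x2 y2 - pvNN points (x1 - 1) y2 - pvNN points x2 (y1 - 1)
        + pvNN points (x1 - 1) (y1 - 1) =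
      (((pvCells points).filter
          (fun c => x1 ≤ c.1 ∧ c.1 ≤ x2 ∧ y1 ≤ c.2 ∧ c.2 ≤ y2)).card : Int) := by
  unfold pvNN
  simp only [Finset.card_filter]
  push_cast
  rw [← Finset.sum_sub_distrib, ← Finset.sum_sub_distrib, ← Finset.sum_add_distrib]
  refine Finset.sum_congr rfl ?_
  rintro ⟨c1, c2⟩ hc
  have hpos := pv_cells_pos points _ hc
  simp only at *
  split_ifs <;> omega

-- the prefix-sum double loop of A, abstractly: one row of the table
lemma pv_ps_inner (grid : List (List Int)) (N : Nat → Nat → Int) (M K : Nat)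
    (hN0 : ∀ j, N 0 j = 0) (hN0' : ∀ i, N i 0 = 0)
    (hrec : ∀ i j : Nat, 1 ≤ i → i ≤ M → 1 ≤ j → j ≤ K →
      N i j = pvReadN grid i j + N (i - 1) j + N i (j - 1) - N (i - 1) (j - 1))
    (iN : Nat) (hi1 : 1 ≤ iN) (hiM : iN ≤ M) : ∀ (jc : Nat), jc ≤ K → ∀ (ps : List (List Int)),
    ps.length = M + 2 → (∀ x, x < M + 2 → (ps.getD x []).length = K + 2) →
    (∀ a b : Nat, pvReadN ps a b =
      if 1 ≤ a ∧ a < iN ∧ 1 ≤ b ∧ b ≤ K then N a b else 0) →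
    ((PySem.List.pyRange 1 ((jc : Int) + 1) 1).foldl (fun ps j =>
        PySem.List.pySetD ps (iN : Int) (PySem.List.pySetD (PySem.List.pyGetD ps (iN : Int) []) j
          (pvARead grid (iN : Int) j + pvARead ps ((iN : Int) - 1) j
            + pvARead ps (iN : Int) (j - 1) - pvARead ps ((iN : Int) - 1) (j - 1)))) ps).length = M + 2 ∧
    (∀ x, x < M + 2 → (((PySem.List.pyRange 1 ((jc : Int) + 1) 1).foldl (fun ps j =>
        PySem.List.pySetD ps (iN : Int) (PySem.List.pySetD (PySem.List.pyGetD ps (iN : Int) []) j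
          (pvARead grid (iN : Int) j + pvARead ps ((iN : Int) - 1) j
            + pvARead ps (iN : Int) (j - 1) - pvARead ps ((iN : Int) - 1) (j - 1)))) ps).getD x []).length = K + 2) ∧
    (∀ a b : Nat, pvReadN ((PySem.List.pyRange 1 ((jc : Int) + 1) 1).foldl (fun ps j =>
        PySem.List.pySetD ps (iN : Int) (PySem.List.pySetD (PySem.List.pyGetD ps (iN : Int) []) j
          (pvARead grid (iN : Int) j + pvARead ps ((iN : Int) - 1) j
            + pvARead ps (iN : Int) (j - 1) - pvARead ps ((iN : Int) - 1) (j - 1)))) ps) a b =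
      if (1 ≤ a ∧ a < iN ∧ 1 ≤ b ∧ b ≤ K) ∨ (a = iN ∧ 1 ≤ b ∧ b ≤ jc) then N a b else 0) := by
  intro jc
  induction jc with
  | zero =>
    intro _ ps hL hR hD
    rw [show PySem.List.pyRange 1 (((0 : Nat) : Int) + 1) 1 = [] by
      rw [show (((0 : Nat) : Int) + 1) = (1 : Int) by norm_num]
      exact PySem.List.pyRange_one_eq_nil (by norm_num)]
    simp only [List.foldl_nil]
    refine ⟨hL, hR, ?_⟩
    intro a b
    rw [hD a b]
    by_cases hc : 1 ≤ a ∧ a < iN ∧ 1 ≤ b ∧ b ≤ K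
    · rw [if_pos hc, if_pos (Or.inl hc)]
    · rw [if_neg hc, if_neg (by omega)]
  | succ jc ih =>
    intro hK ps hL hR hD
    obtain ⟨ihL, ihR, ihD⟩ := ih (by omega) ps hL hR hD
    have hsplit : PySem.List.pyRange 1 (((jc + 1 : Nat) : Int) + 1) 1 =
        PySem.List.pyRange 1 ((jc : Int) + 1) 1 ++ [(jc : Int) + 1] := by
      rw [show ((((jc + 1 : Nat)) : Int) + 1) = (((jc : Int) + 1) + 1) by push_cast; ring]
      exact PySem.List.pyRange_one_succ_right (by omega)
    rw [hsplit, List.foldl_append]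
    simp only [List.foldl_cons, List.foldl_nil]
    set F := List.foldl (fun ps j =>
        PySem.List.pySetD ps (iN : Int) (PySem.List.pySetD (PySem.List.pyGetD ps (iN : Int) []) j
          (pvARead grid (iN : Int) j + pvARead ps ((iN : Int) - 1) j
            + pvARead ps (iN : Int) (j - 1) - pvARead ps ((iN : Int) - 1) (j - 1)))) ps
        (PySem.List.pyRange 1 ((jc : Int) + 1) 1) with hF
    have e1 : (iN : Int) - 1 = ((iN - 1 : Nat) : Int) := by omega
    have e3 : ((jc : Int) + 1) - 1 = ((jc : Nat) : Int) := by omega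
    have e2 : ((jc : Int) + 1) = ((jc + 1 : Nat) : Int) := by push_cast; ring
    rw [e1, e3, e2]
    rw [PySem.List.pyGetD_natCast, PySem.List.pySetD_natCast, PySem.List.pySetD_natCast]
    simp only [pvARead_natCast]
    have r1 : pvReadN F (iN - 1) (jc + 1) = N (iN - 1) (jc + 1) := by
      rw [ihD]
      by_cases h : 1 ≤ iN - 1
      · rw [if_pos (Or.inl ⟨h, by omega, by omega, hK⟩)]
      · rw [if_neg (by omega), show iN - 1 = 0 by omega, hN0]
    have r2 : pvReadN F iN jc = N iN jc := by
      rw [ihD]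
      by_cases h : 1 ≤ jc
      · rw [if_pos (Or.inr ⟨rfl, h, le_refl jc⟩)]
      · rw [if_neg (by omega), show jc = 0 by omega, hN0']
    have r3 : pvReadN F (iN - 1) jc = N (iN - 1) jc := by
      rw [ihD]
      by_cases h : 1 ≤ iN - 1 ∧ 1 ≤ jc
      · rw [if_pos (Or.inl ⟨h.1, by omega, h.2, by omega⟩)]
      · rw [if_neg (by omega)]
        by_cases h1 : 1 ≤ iN - 1
        · rw [show jc = 0 by omega, hN0']
        · rw [show iN - 1 = 0 by omega, hN0]
    rw [r1, r2, r3]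
    have hval : pvReadN grid iN (jc + 1) + N (iN - 1) (jc + 1) + N iN jc - N (iN - 1) jc
        = N iN (jc + 1) := by
      rw [hrec iN (jc + 1) hi1 hiM (by omega) hK]
      simp
    rw [hval]
    have hxF : iN < F.length := by rw [ihL]; omega
    have hyF : jc + 1 < (F.getD iN []).length := by rw [ihR iN (by omega)]; omega
    refine ⟨by rw [List.length_set, ihL], ?_, ?_⟩
    · intro x hx
      by_cases hxe : x = iN
      · have hgd : (F.set iN ((F.getD iN []).set (jc + 1) (N iN (jc + 1)))).getD x [] =
            (F.getD iN []).set (jc + 1) (N iN (jc + 1)) := by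
          rw [hxe]
          simp only [List.getD_eq_getElem?_getD, List.getElem?_set]
          simp [hxF]
        rw [hgd, List.length_set]
        exact ihR iN (by omega)
      · have hgd : (F.set iN ((F.getD iN []).set (jc + 1) (N iN (jc + 1)))).getD x [] =
            F.getD x [] := by
          simp only [List.getD_eq_getElem?_getD, List.getElem?_set]
          simp [Ne.symm hxe]
        rw [hgd]
        exact ihR x hx
    · intro a b
      rw [pv_readN_set F iN (jc + 1) _ a b hxF hyF]
      by_cases hab : a = iN ∧ b = jc + 1
      · rw [if_pos hab, if_pos (Or.inr ⟨hab.1, by omega, by omega⟩), hab.1, hab.2]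
      · rw [if_neg hab, ihD a b]
        by_cases hc : 1 ≤ a ∧ a < iN ∧ 1 ≤ b ∧ b ≤ K
        · rw [if_pos (Or.inl hc), if_pos (Or.inl hc)]
        · by_cases hc2 : a = iN ∧ 1 ≤ b ∧ b ≤ jc
          · rw [if_pos (Or.inr hc2), if_pos (Or.inr ⟨hc2.1, hc2.2.1, by omega⟩)]
          · rw [if_neg (by omega), if_neg (by omega)]

lemma pv_ps_outer (grid : List (List Int)) (N : Nat → Nat → Int) (M K : Nat)
    (hN0 : ∀ j, N 0 j = 0) (hN0' : ∀ i, N i 0 = 0)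
    (hrec : ∀ i j : Nat, 1 ≤ i → i ≤ M → 1 ≤ j → j ≤ K →
      N i j = pvReadN grid i j + N (i - 1) j + N i (j - 1) - N (i - 1) (j - 1)) :
    ∀ (c : Nat), c ≤ M →
    ((PySem.List.pyRange 1 ((c : Int) + 1) 1).foldl (fun ps i =>
        (PySem.List.pyRange 1 ((K : Int) + 1) 1).foldl (fun ps j =>
          PySem.List.pySetD ps i (PySem.List.pySetD (PySem.List.pyGetD ps i []) j
            (pvARead grid i j + pvARead ps (i - 1) j
              + pvARead ps i (j - 1) - pvARead ps (i - 1) (j - 1)))) ps)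
      (List.replicate (M + 2) (List.replicate (K + 2) (0 : Int)))).length = M + 2 ∧
    (∀ x, x < M + 2 → (((PySem.List.pyRange 1 ((c : Int) + 1) 1).foldl (fun ps i =>
        (PySem.List.pyRange 1 ((K : Int) + 1) 1).foldl (fun ps j =>
          PySem.List.pySetD ps i (PySem.List.pySetD (PySem.List.pyGetD ps i []) j
            (pvARead grid i j + pvARead ps (i - 1) j
              + pvARead ps i (j - 1) - pvARead ps (i - 1) (j - 1)))) ps)
      (List.replicate (M + 2) (List.replicate (K + 2) (0 : Int)))).getD x []).length = K + 2) ∧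
    (∀ a b : Nat,
    pvReadN ((PySem.List.pyRange 1 ((c : Int) + 1) 1).foldl (fun ps i =>
        (PySem.List.pyRange 1 ((K : Int) + 1) 1).foldl (fun ps j =>
          PySem.List.pySetD ps i (PySem.List.pySetD (PySem.List.pyGetD ps i []) j
            (pvARead grid i j + pvARead ps (i - 1) j
              + pvARead ps i (j - 1) - pvARead ps (i - 1) (j - 1)))) ps)
      (List.replicate (M + 2) (List.replicate (K + 2) (0 : Int)))) a b =
      if 1 ≤ a ∧ a ≤ c ∧ 1 ≤ b ∧ b ≤ K then N a b else 0) := by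
  intro c
  induction c with
  | zero =>
    intro _
    rw [show PySem.List.pyRange 1 (((0 : Nat) : Int) + 1) 1 = [] by
      rw [show (((0 : Nat) : Int) + 1) = (1 : Int) by norm_num]
      exact PySem.List.pyRange_one_eq_nil (by norm_num)]
    simp only [List.foldl_nil]
    refine ⟨by rw [List.length_replicate], ?_, ?_⟩
    · intro x hx
      rw [List.getD_replicate _ hx, List.length_replicate]
    · intro a b
      rw [pv_readN_replicate]
      rw [if_neg (by omega)]
  | succ c ihc =>
    intro hc1
    obtain ⟨L, R, D⟩ := ihc (by omega)
    have hsplit : PySem.List.pyRange 1 (((c + 1 : Nat) : Int) + 1) 1 =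
        PySem.List.pyRange 1 ((c : Int) + 1) 1 ++ [(c : Int) + 1] := by
      rw [show ((((c + 1 : Nat)) : Int) + 1) = (((c : Int) + 1) + 1) by push_cast; ring]
      exact PySem.List.pyRange_one_succ_right (by omega)
    rw [hsplit, List.foldl_append]
    simp only [List.foldl_cons, List.foldl_nil]
    have hD' : ∀ a b : Nat,
        pvReadN (List.foldl (fun ps i =>
          List.foldl (fun ps j =>
            PySem.List.pySetD ps i (PySem.List.pySetD (PySem.List.pyGetD ps i []) j
              (pvARead grid i j + pvARead ps (i - 1) j
                + pvARead ps i (j - 1) - pvARead ps (i - 1) (j - 1))))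
            ps (PySem.List.pyRange 1 ((K : Int) + 1) 1))
          (List.replicate (M + 2) (List.replicate (K + 2) (0 : Int)))
          (PySem.List.pyRange 1 ((c : Int) + 1) 1)) a b =
        if 1 ≤ a ∧ a < c + 1 ∧ 1 ≤ b ∧ b ≤ K then N a b else 0 := by
      intro a b
      rw [D a b]
      by_cases h : 1 ≤ a ∧ a ≤ c ∧ 1 ≤ b ∧ b ≤ K
      · rw [if_pos h, if_pos (by omega)]
      · rw [if_neg h, if_neg (by omega)]
    have H := pv_ps_inner grid N M K hN0 hN0' hrec (c + 1) (by omega) hc1 K (le_refl K) _ L R hD'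
    rw [show (((c + 1 : Nat)) : Int) = ((c : Int) + 1) by push_cast; ring] at H
    obtain ⟨L2, R2, D2⟩ := H
    refine ⟨L2, R2, ?_⟩
    intro a b
    rw [D2 a b]
    by_cases h : 1 ≤ a ∧ a ≤ c + 1 ∧ 1 ≤ b ∧ b ≤ K
    · rw [if_pos (by omega), if_pos h]
    · rw [if_neg (by omega), if_neg h]

-- A's ps table computes pvNN
lemma pv_ps_read (points : List (List Int)) (a b : Nat) :
    pvReadN (pvAPS points) a b =
      if 1 ≤ a ∧ a ≤ (pvAXs points).length ∧ 1 ≤ b ∧ b ≤ (pvAYs points).length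
      then pvNN points a b else 0 := by
  unfold pvAPS
  have hrec : ∀ i j : Nat, 1 ≤ i → i ≤ (pvAXs points).length → 1 ≤ j → j ≤ (pvAYs points).length →
      pvNN points i j = pvReadN (pvAGrid points) i j + pvNN points (i - 1) j
        + pvNN points i (j - 1) - pvNN points (i - 1) (j - 1) := by
    intro i j hi _ hj _
    rw [pv_grid_eq points i j]
    exact pvNN_rec points i j hi hj
  have H := (pv_ps_outer (pvAGrid points) (pvNN points) (pvAXs points).length (pvAYs points).length
    (pvNN_zero_left points) (pvNN_zero_right points) hrec (pvAXs points).length (le_refl _)).2.2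
  simp only [PySem.List.len_eq]
  exact H a b

-- rect_count of A is the number of occupied cells in the index rectangle
lemma pv_rect_eval (points : List (List Int)) (x1 y1 x2 y2 : Nat)
    (h1 : 1 ≤ x1) (h2 : x1 ≤ x2) (h2M : x2 ≤ (pvAXs points).length)
    (h3 : 1 ≤ y1) (h4 : y1 ≤ y2) (h4K : y2 ≤ (pvAYs points).length) :
    pvARectCount (pvAPS points) (x1 : Int) (y1 : Int) (x2 : Int) (y2 : Int) =
      (((pvCells points).filter
          (fun c => x1 ≤ c.1 ∧ c.1 ≤ x2 ∧ y1 ≤ c.2 ∧ c.2 ≤ y2)).card : Int) := by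
  unfold pvARectCount
  rw [show (x1 : Int) - 1 = ((x1 - 1 : Nat) : Int) by omega,
    show (y1 : Int) - 1 = ((y1 - 1 : Nat) : Int) by omega]
  simp only [pvARead_natCast]
  rw [pv_ps_read, pv_ps_read, pv_ps_read, pv_ps_read]
  have r1 : (if 1 ≤ x2 ∧ x2 ≤ (pvAXs points).length ∧ 1 ≤ y2 ∧ y2 ≤ (pvAYs points).length
      then pvNN points x2 y2 else 0) = pvNN points x2 y2 := if_pos ⟨by omega, h2M, by omega, h4K⟩
  have r2 : (if 1 ≤ x1 - 1 ∧ x1 - 1 ≤ (pvAXs points).length ∧ 1 ≤ y2 ∧ y2 ≤ (pvAYs points).length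
      then pvNN points (x1 - 1) y2 else 0) = pvNN points (x1 - 1) y2 := by
    by_cases h : 1 ≤ x1 - 1
    · exact if_pos ⟨h, by omega, by omega, h4K⟩
    · rw [if_neg (by omega), show x1 - 1 = 0 by omega, pvNN_zero_left]
  have r3 : (if 1 ≤ x2 ∧ x2 ≤ (pvAXs points).length ∧ 1 ≤ y1 - 1 ∧ y1 - 1 ≤ (pvAYs points).length
      then pvNN points x2 (y1 - 1) else 0) = pvNN points x2 (y1 - 1) := by
    by_cases h : 1 ≤ y1 - 1
    · exact if_pos ⟨by omega, h2M, h, by omega⟩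
    · rw [if_neg (by omega), show y1 - 1 = 0 by omega, pvNN_zero_right]
  have r4 : (if 1 ≤ x1 - 1 ∧ x1 - 1 ≤ (pvAXs points).length ∧ 1 ≤ y1 - 1 ∧ y1 - 1 ≤ (pvAYs points).length
      then pvNN points (x1 - 1) (y1 - 1) else 0) = pvNN points (x1 - 1) (y1 - 1) := by
    by_cases h : 1 ≤ x1 - 1 ∧ 1 ≤ y1 - 1
    · exact if_pos ⟨h.1, by omega, h.2, by omega⟩
    · rw [if_neg (by omega)]
      by_cases h1 : 1 ≤ x1 - 1
      · rw [show y1 - 1 = 0 by omega, pvNN_zero_right]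
      · rw [show x1 - 1 = 0 by omega, pvNN_zero_left]
  rw [r1, r2, r3, r4]
  exact pvNN_rect points x1 y1 x2 y2 h1 h2 h3 h4

lemma pv_card_two {γ : Type} [DecidableEq γ] (S : Finset γ) (a b : γ)
    (ha : a ∈ S) (hb : b ∈ S) (hab : a ≠ b) :
    S.card = 2 ↔ ∀ c ∈ S, c = a ∨ c = b := by
  constructor
  · intro h2 c hc
    have hsub : ({a, b} : Finset γ) ⊆ S := by
      intro x hx
      rcases Finset.mem_insert.mp hx with rfl | hx
      · exact ha
      · rw [Finset.mem_singleton.mp hx]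
        exact hb
    have heq := Finset.eq_of_subset_of_card_le hsub (by rw [h2, Finset.card_pair hab])
    rw [← heq] at hc
    rcases Finset.mem_insert.mp hc with rfl | hc
    · exact Or.inl rfl
    · exact Or.inr (Finset.mem_singleton.mp hc)
  · intro hall
    have : S = {a, b} := by
      apply Finset.ext
      intro c
      constructor
      · intro hc
        rcases hall c hc with rfl | rfl
        · exact Finset.mem_insert_self _ _
        · exact Finset.mem_insert_of_mem (Finset.mem_singleton_self _)
      · intro hc
        rcases Finset.mem_insert.mp hc with rfl | hc
        · exact ha
        · rw [Finset.mem_singleton.mp hc]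
          exact hb
    rw [this, Finset.card_pair hab]

lemma pv_cell_eq_iff (points : List (List Int)) (p q : List Int)
    (hp : p ∈ points) (hq : q ∈ points) :
    pvCell points p = pvCell points q ↔ (pvX p = pvX q ∧ pvY p = pvY q) := by
  unfold pvCell pvCX pvCY
  rw [Prod.mk.injEq]
  constructor
  · rintro ⟨h1, h2⟩
    exact ⟨pv_idxOf_inj _ (pv_xs_lt points) _ _ (pv_mem_xs points p hp) (pv_mem_xs points q hq) (by omega),
      pv_idxOf_inj _ (pv_ys_lt points) _ _ (pv_mem_ys points p hp) (pv_mem_ys points q hq) (by omega)⟩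
  · rintro ⟨h1, h2⟩
    rw [h1, h2]
    exact ⟨rfl, rfl⟩

lemma pv_cx_le_iff (points : List (List Int)) (x x' : Int)
    (hx : x ∈ pvAXs points) (hx' : x' ∈ pvAXs points) :
    pvCX points x ≤ pvCX points x' ↔ x ≤ x' := by
  unfold pvCX
  rw [show ((pvAXs points).idxOf x + 1 ≤ (pvAXs points).idxOf x' + 1) ↔
      ((pvAXs points).idxOf x ≤ (pvAXs points).idxOf x') from by omega]
  exact pv_idxOf_le_iff _ (pv_xs_lt points) _ _ hx hx' 

lemma pv_cy_le_iff (points : List (List Int)) (y y' : Int)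
    (hy : y ∈ pvAYs points) (hy' : y' ∈ pvAYs points) :
    pvCY points y ≤ pvCY points y' ↔ y ≤ y' := by
  unfold pvCY
  rw [show ((pvAYs points).idxOf y + 1 ≤ (pvAYs points).idxOf y' + 1) ↔
      ((pvAYs points).idxOf y ≤ (pvAYs points).idxOf y') from by omega]
  exact pv_idxOf_le_iff _ (pv_ys_lt points) _ _ hy hy' 

-- the degenerate pair (same position): A's rect_count is 1, never 2
lemma pv_pair_degenerate (points : List (List Int)) (pa pb : List Int)
    (hpa : pa ∈ points) (hpb : pb ∈ points)
    (hxy : pvX pa = pvX pb ∧ pvY pa = pvY pb) :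
    pvARectCount (pvAPS points) ((pvAXmap points).getD (pvX pa) 0)
      ((pvAYmap points).getD (pvY pb) 0) ((pvAXmap points).getD (pvX pb) 0)
      ((pvAYmap points).getD (pvY pa) 0) ≠ 2 := by
  obtain ⟨hx, hy⟩ := hxy
  have ma := pv_mem_xs points pa hpa
  have mb := pv_mem_xs points pb hpb
  have na := pv_mem_ys points pa hpa
  have nb := pv_mem_ys points pb hpb
  rw [pv_xmap_getD points _ ma, pv_ymap_getD points _ nb, pv_xmap_getD points _ mb,
    pv_ymap_getD points _ na]
  have hcx : pvCX points (pvX pa) = pvCX points (pvX pb) := by rw [hx]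
  have hcy : pvCY points (pvY pa) = pvCY points (pvY pb) := by rw [hy]
  rw [pv_rect_eval points _ _ _ _ (by unfold pvCX; omega) (le_of_eq hcx) (pv_cx_lt points _ mb)
    (by unfold pvCY; omega) (le_of_eq hcy.symm) (pv_cy_lt points _ na)]
  intro hcontr
  have hsub : ((pvCells points).filter (fun c => pvCX points (pvX pa) ≤ c.1 ∧
      c.1 ≤ pvCX points (pvX pb) ∧ pvCY points (pvY pb) ≤ c.2 ∧ c.2 ≤ pvCY points (pvY pa))) ⊆
      {(pvCX points (pvX pa), pvCY points (pvY pa))} := by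
    rintro ⟨c1, c2⟩ hcmem
    obtain ⟨_, hpred⟩ := Finset.mem_filter.mp hcmem
    simp only at hpred
    rw [Finset.mem_singleton, Prod.mk.injEq]
    constructor <;> omega
  have hle := Finset.card_le_card hsub
  rw [Finset.card_singleton] at hle
  have h2 : (((pvCells points).filter (fun c => pvCX points (pvX pa) ≤ c.1 ∧
      c.1 ≤ pvCX points (pvX pb) ∧ pvCY points (pvY pb) ≤ c.2 ∧ c.2 ≤ pvCY points (pvY pa))).card) = 2 := by
    exact_mod_cast hcontr
  omega

-- the central equivalence for a dominating pair at distinct positions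
lemma pv_pair (points : List (List Int)) (pa pb : List Int)
    (hpa : pa ∈ points) (hpb : pb ∈ points)
    (hne : ¬(pvX pa = pvX pb ∧ pvY pa = pvY pb))
    (hd1 : pvX pa ≤ pvX pb) (hd2 : pvY pb ≤ pvY pa) :
    (pvARectCount (pvAPS points) ((pvAXmap points).getD (pvX pa) 0)
        ((pvAYmap points).getD (pvY pb) 0) ((pvAXmap points).getD (pvX pb) 0)
        ((pvAYmap points).getD (pvY pa) 0) = 2) ↔
      ∀ p ∈ points, (pvX p = pvX pa ∧ pvY p = pvY pa) ∨ (pvX p = pvX pb ∧ pvY p = pvY pb) ∨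
        ¬(pvX pa ≤ pvX p ∧ pvX p ≤ pvX pb ∧ pvY pb ≤ pvY p ∧ pvY p ≤ pvY pa) := by
  have ma := pv_mem_xs points pa hpa
  have mb := pv_mem_xs points pb hpb
  have na := pv_mem_ys points pa hpa
  have nb := pv_mem_ys points pb hpb
  rw [pv_xmap_getD points _ ma, pv_ymap_getD points _ nb, pv_xmap_getD points _ mb,
    pv_ymap_getD points _ na]
  have hx12 : pvCX points (pvX pa) ≤ pvCX points (pvX pb) := (pv_cx_le_iff points _ _ ma mb).mpr hd1
  have hy12 : pvCY points (pvY pb) ≤ pvCY points (pvY pa) := (pv_cy_le_iff points _ _ nb na).mpr hd2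
  rw [pv_rect_eval points _ _ _ _ (by unfold pvCX; omega) hx12 (pv_cx_lt points _ mb)
    (by unfold pvCY; omega) hy12 (pv_cy_lt points _ na)]
  have hcellsa : pvCell points pa ∈ pvCells points := by
    unfold pvCells
    rw [List.mem_toFinset]
    exact List.mem_map_of_mem hpa
  have hcellsb : pvCell points pb ∈ pvCells points := by
    unfold pvCells
    rw [List.mem_toFinset]
    exact List.mem_map_of_mem hpb
  have hca : pvCell points pa ∈ (pvCells points).filter (fun c => pvCX points (pvX pa) ≤ c.1 ∧
      c.1 ≤ pvCX points (pvX pb) ∧ pvCY points (pvY pb) ≤ c.2 ∧ c.2 ≤ pvCY points (pvY pa)) :=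
    Finset.mem_filter.mpr ⟨hcellsa, ⟨le_refl _, hx12, hy12, le_refl _⟩⟩
  have hcb : pvCell points pb ∈ (pvCells points).filter (fun c => pvCX points (pvX pa) ≤ c.1 ∧
      c.1 ≤ pvCX points (pvX pb) ∧ pvCY points (pvY pb) ≤ c.2 ∧ c.2 ≤ pvCY points (pvY pa)) :=
    Finset.mem_filter.mpr ⟨hcellsb, ⟨hx12, le_refl _, le_refl _, hy12⟩⟩
  have hab : pvCell points pa ≠ pvCell points pb :=
    fun h => hne ((pv_cell_eq_iff points pa pb hpa hpb).mp h)
  have hcard := pv_card_two _ _ _ hca hcb hab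
  constructor
  · intro h2
    have h2' : (((pvCells points).filter (fun c => pvCX points (pvX pa) ≤ c.1 ∧
        c.1 ≤ pvCX points (pvX pb) ∧ pvCY points (pvY pb) ≤ c.2 ∧ c.2 ≤ pvCY points (pvY pa))).card) = 2 := by
      exact_mod_cast h2
    intro p hp
    by_cases hr : pvX pa ≤ pvX p ∧ pvX p ≤ pvX pb ∧ pvY pb ≤ pvY p ∧ pvY p ≤ pvY pa
    · have hmx := pv_mem_xs points p hp
      have hmy := pv_mem_ys points p hp
      have hcp : pvCell points p ∈ (pvCells points).filter (fun c => pvCX points (pvX pa) ≤ c.1 ∧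
          c.1 ≤ pvCX points (pvX pb) ∧ pvCY points (pvY pb) ≤ c.2 ∧ c.2 ≤ pvCY points (pvY pa)) :=
        Finset.mem_filter.mpr ⟨by
            unfold pvCells
            rw [List.mem_toFinset]
            exact List.mem_map_of_mem hp,
          ⟨(pv_cx_le_iff points _ _ ma hmx).mpr hr.1, (pv_cx_le_iff points _ _ hmx mb).mpr hr.2.1,
            (pv_cy_le_iff points _ _ nb hmy).mpr hr.2.2.1, (pv_cy_le_iff points _ _ hmy na).mpr hr.2.2.2⟩⟩
      rcases hcard.mp h2' _ hcp with hc | hc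
      · exact Or.inl ((pv_cell_eq_iff points p pa hp hpa).mp hc)
      · exact Or.inr (Or.inl ((pv_cell_eq_iff points p pb hp hpb).mp hc))
    · exact Or.inr (Or.inr hr)
  · intro hall
    have hsub : ∀ c ∈ (pvCells points).filter (fun c => pvCX points (pvX pa) ≤ c.1 ∧
        c.1 ≤ pvCX points (pvX pb) ∧ pvCY points (pvY pb) ≤ c.2 ∧ c.2 ≤ pvCY points (pvY pa)),
        c = pvCell points pa ∨ c = pvCell points pb := by
      intro c hc
      obtain ⟨hcc, hpred⟩ := Finset.mem_filter.mp hc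
      unfold pvCells at hcc
      obtain ⟨p, hp, hpc⟩ := List.mem_map.mp (List.mem_toFinset.mp hcc)
      have hmx := pv_mem_xs points p hp
      have hmy := pv_mem_ys points p hp
      rw [← hpc] at hpred ⊢
      rcases hall p hp with ⟨h1, h2⟩ | ⟨h1, h2⟩ | h3
      · exact Or.inl ((pv_cell_eq_iff points p pa hp hpa).mpr ⟨h1, h2⟩)
      · exact Or.inr ((pv_cell_eq_iff points p pb hp hpb).mpr ⟨h1, h2⟩)
      · refine absurd ⟨(pv_cx_le_iff points _ _ ma hmx).mp hpred.1,
          (pv_cx_le_iff points _ _ hmx mb).mp hpred.2.1,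
          (pv_cy_le_iff points _ _ nb hmy).mp hpred.2.2.1,
          (pv_cy_le_iff points _ _ hmy na).mp hpred.2.2.2⟩ h3
    exact_mod_cast hcard.mpr hsub

lemma pv_main (points : List (List Int)) : numberOfPairs points = numberOfPairs_alt points := by
  simp only [numberOfPairs, numberOfPairs_alt]
  rw [show PySem.List.enumerate points =
      (PySem.List.pyRange 0 (PySem.List.len points) 1).map (fun j => (j, PySem.List.pyGetD points j []))
    from PySem.List.enumerate_eq_map_pyRange points []]
  simp only [List.foldl_map]
  apply PySem.List.foldl_congr_mem
  intro ans i hi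
  dsimp only
  obtain ⟨hi0, hin⟩ := PySem.List.mem_pyRange_one.mp hi
  rw [PySem.List.len_eq] at hin
  have hpa : PySem.List.pyGetD points i [] ∈ points :=
    PySem.List.pyGetD_mem points [] (by simp [PySem.Raise.InRange]; omega)
  apply PySem.List.foldl_congr_mem
  intro ans2 j hj
  dsimp only
  obtain ⟨hj0, hjn⟩ := PySem.List.mem_pyRange_one.mp hj
  rw [PySem.List.len_eq] at hjn
  have hpb : PySem.List.pyGetD points j [] ∈ points :=
    PySem.List.pyGetD_mem points [] (by simp [PySem.Raise.InRange]; omega)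
  set pa := PySem.List.pyGetD points i [] with hpaeq
  set pb := PySem.List.pyGetD points j [] with hpbeq
  simp only [show ∀ p : List Int, PySem.List.pyGetD p 0 0 = pvX p from fun _ => rfl,
    show ∀ p : List Int, PySem.List.pyGetD p 1 0 = pvY p from fun _ => rfl]
  by_cases hij : i = j
  · rw [if_pos hij, if_pos (Or.inl hij)]
  · rw [if_neg hij]
    by_cases heq : pvX pa = pvX pb ∧ pvY pa = pvY pb
    · rw [if_pos (Or.inr heq)]
      by_cases hdom : pvX pa ≤ pvX pb ∧ pvY pa ≥ pvY pb
      · rw [if_pos hdom, if_neg (pv_pair_degenerate points pa pb hpa hpb heq)]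
      · rw [if_neg hdom]
    · rw [if_neg (not_or.mpr ⟨hij, heq⟩)]
      by_cases hdom : pvX pa ≤ pvX pb ∧ pvY pa ≥ pvY pb
      · rw [if_pos hdom, if_pos hdom]
        refine if_congr ?_ rfl rfl
        rw [List.all_eq_true]
        simp only [decide_eq_true_eq]
        exact pv_pair points pa pb hpa hpb heq hdom.1 hdom.2
      · rw [if_neg hdom, if_neg hdom]

-- ===== VERDICT (by name: the statement is the Claim_ definition above) =====
theorem numberOfPairs_spec : Claim_equal_numberOfPairs := by
  intro points _ _
  unfold Spec_numberOfPairs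
  exact pv_main points
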